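-- pv_equiv track=rewrite | github.com/furkanaktas/CSE-321 | hw5/decentNumber_141044029.py | threes
-- ===== SOURCE A (Python) =====
-- def threes(num):
-- 	sum_num = 0
-- 	result = 0
-- 	for i in range(num):
-- 		sum_num += 3
-- 		result += (10**i)*3
--
-- 	if sum_num % 5 == 0:
-- 		return result
-- 	else:
-- 		return 0
-- ===== SOURCE B (Python) =====
-- def threes(num):
--     # closed form: sum of 3*10^i for i in 0..num-1 is 3*(10**num - 1)//9
--     if num >= 0 and num % 5 == 0:
--         return 3 * (10**num - 1) // 9
--     return 0
-- ===== Notes on version B (the rewrite author's own statement) =====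
-- stated objective: simpler
-- what changed: Replaced the accumulation loop with the closed-form geometric-series value 3*(10**num - 1)//9 behind the same divisibility guard.
import Mathlib
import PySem

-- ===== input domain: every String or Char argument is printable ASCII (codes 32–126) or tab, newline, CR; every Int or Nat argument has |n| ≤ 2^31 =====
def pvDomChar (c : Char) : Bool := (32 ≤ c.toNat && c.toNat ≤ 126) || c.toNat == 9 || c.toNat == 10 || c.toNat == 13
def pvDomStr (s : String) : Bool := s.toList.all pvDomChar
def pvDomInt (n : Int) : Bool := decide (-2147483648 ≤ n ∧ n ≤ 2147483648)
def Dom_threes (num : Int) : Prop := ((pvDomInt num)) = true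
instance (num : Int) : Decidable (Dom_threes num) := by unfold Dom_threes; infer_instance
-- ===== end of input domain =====

-- B replaces A's accumulation loop with the closed-form value 3*(10^num - 1)//9: simpler.


-- ===== PORT A =====
def threes (num : Int) : Int :=
  let st := (PySem.List.pyRange 0 num 1).foldl
    (fun (p : Int × Int) i => (p.1 + 3, p.2 + 10 ^ i.toNat * 3)) (0, 0)
  if PySem.Int.mod st.1 5 = 0 then st.2 else 0

-- ===== PORT B =====
def threes_alt (num : Int) : Int :=
  if num ≥ 0 ∧ PySem.Int.mod num 5 = 0 then
    PySem.Int.floordiv (3 * (10 ^ num.toNat - 1)) 9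
  else 0

-- ===== PRECONDITION & SPEC =====
def Spec_threes (num : Int) (out : Int) : Prop := out = threes_alt num
instance (num : Int) (out : Int) : Decidable (Spec_threes num out) := by unfold Spec_threes; infer_instance

-- ===== CLAIM (what is proved, stated in full; the proofs are below) =====
def Claim_equal_threes : Prop := ∀ (num : Int), Dom_threes num → Spec_threes num (threes num)

-- ===== LEMMAS AND PROOFS =====

-- invariant of A's loop over range(0, n): sum_num = 3*n and 3*result = 10^n - 1
theorem threes_loop_inv (n : Nat) :
    ((PySem.List.pyRange 0 (n : Int) 1).foldl
      (fun (p : Int × Int) i => (p.1 + 3, p.2 + 10 ^ i.toNat * 3)) (0, 0)) =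
    (3 * (n : Int), (10 ^ n - 1) / 3) := by
  induction n with
  | zero => simp [PySem.List.pyRange_one_eq_nil]
  | succ k ih =>
    rw [show ((k + 1 : Nat) : Int) = (k : Int) + 1 by push_cast; ring,
        PySem.List.pyRange_one_succ_right (by positivity)]
    rw [List.foldl_append, ih]
    simp only [List.foldl_cons, List.foldl_nil, Prod.mk.injEq]
    constructor
    · ring
    · have h9 : (3 : Int) ∣ 10 ^ k - 1 := by
        have hme : (1 : Int) ^ k ≡ 10 ^ k [ZMOD 3] := Int.ModEq.pow k (by decide)
        simpa using Int.ModEq.dvd hme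
      obtain ⟨r, hr⟩ := h9
      have hk : (k : Int).toNat = k := Int.toNat_natCast k
      rw [hk, hr]
      have hnext : (10 : Int) ^ (k + 1) - 1 = 3 * (r + 3 * 10 ^ k) := by
        rw [pow_succ]; linarith [hr]
      rw [hnext, Int.mul_ediv_cancel_left _ (by norm_num), Int.mul_ediv_cancel_left _ (by norm_num)]
      ring

theorem threes_eq (num : Int) : threes num = threes_alt num := by
  by_cases h : 0 ≤ num
  · obtain ⟨n, rfl⟩ := Int.eq_ofNat_of_zero_le h
    unfold threes threes_alt
    rw [threes_loop_inv]
    have h9 : (3 : Int) ∣ 10 ^ n - 1 := by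
      have hme : (1 : Int) ^ n ≡ 10 ^ n [ZMOD 3] := Int.ModEq.pow n (by decide)
      simpa using Int.ModEq.dvd hme
    obtain ⟨r, hr⟩ := h9
    have hmod : PySem.Int.mod (3 * (n : Int)) 5 = 0 ↔ PySem.Int.mod (n : Int) 5 = 0 := by
      rw [PySem.Int.mod_eq_emod_of_pos (by norm_num), PySem.Int.mod_eq_emod_of_pos (by norm_num)]
      omega
    have htoNat : ((n : Int)).toNat = n := Int.toNat_natCast n
    have hfd : PySem.Int.floordiv (3 * (10 ^ n - 1)) 9 = (10 ^ n - 1) / 3 := by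
      rw [PySem.Int.floordiv_eq_ediv_of_pos (by norm_num), hr,
          show (3 : Int) * (3 * r) = 9 * r by ring, Int.mul_ediv_cancel_left _ (by norm_num),
          Int.mul_ediv_cancel_left _ (by norm_num)]
    simp only [htoNat, hfd]
    by_cases h5 : PySem.Int.mod (3 * (n : Int)) 5 = 0
    · rw [if_pos h5, if_pos ⟨h, hmod.mp h5⟩]
    · rw [if_neg h5, if_neg (by intro hc; exact h5 (hmod.mpr hc.2))]
  · push Not at h
    unfold threes threes_alt
    rw [PySem.List.pyRange_one_eq_nil (by omega)]
    simp only [List.foldl_nil]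
    rw [if_pos (by simp [PySem.Int.mod]),
        if_neg (by intro hc; omega)]

-- ===== VERDICT (by name: the statement is the Claim_ definition above) =====
theorem threes_spec : Claim_equal_threes := by
  intro num _
  unfold Spec_threes
  exact threes_eq num
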